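-- pv_equiv track=rewrite | github.com/StellarStoic/BIP39_Exotica | BIP39_Exotica.py | isSequentialArray
-- ===== SOURCE A (Python) =====
-- def isSequentialArray(array):
--     expectedDiff = 2 if len(array) == 8 else 1
--
--     for i in range(1, len(array)):
--         current = int(array[i][:2])
--         previous = int(array[i - 1][:2])
--
--         if current - previous != expectedDiff:
--             return False
--
--     return True
-- ===== SOURCE B (Python) =====
-- def isSequentialArray(array):
--     if len(array) < 2:
--         return True
--     diff = 2 if len(array) == 8 else 1
--     start = int(array[0][:2])
--     return all(int(s[:2]) == start + k * diff for k, s in enumerate(array[1:], 1))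
-- ===== Notes on version B (the rewrite author's own statement) =====
-- stated objective: simpler
-- what changed: Parses an anchor from the first element and checks each later element once against the closed-form expected value start + k*diff in a single enumerate pass, instead of A's index loop that re-parses the previous element and checks pairwise differences.
import Mathlib
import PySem

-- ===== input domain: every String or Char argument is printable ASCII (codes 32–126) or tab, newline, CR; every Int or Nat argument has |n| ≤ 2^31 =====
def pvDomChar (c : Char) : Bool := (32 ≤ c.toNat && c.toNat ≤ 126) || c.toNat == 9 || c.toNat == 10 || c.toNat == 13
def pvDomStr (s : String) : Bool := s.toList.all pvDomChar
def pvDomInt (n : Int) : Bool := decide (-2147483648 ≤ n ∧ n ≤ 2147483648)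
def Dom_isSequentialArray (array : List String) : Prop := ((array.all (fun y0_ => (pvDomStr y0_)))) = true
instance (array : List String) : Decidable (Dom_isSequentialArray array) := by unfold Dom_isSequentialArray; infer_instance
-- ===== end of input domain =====

-- B anchors at the first element and compares each later element once against the closed-form
-- expected value start + k*diff, instead of A's index loop re-parsing the previous element and
-- checking pairwise differences (objective: simpler).

-- int(s[:2]) — shared primitive of both ports (exact Python int() via PySem)
def pvParse2 (s : String) : Option Int := PySem.Int.ofStr? (PySem.Str.slice s none (some 2))

-- ===== PORT A =====
-- A's loop over range(1, len(array)) with early return; 'false' in the 'none' arms marks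
-- inputs where Python raises ValueError — those are excluded by Pre_.
def pvALoop (array : List String) (expectedDiff : Int) : List Int → Bool
  | [] => true
  | i :: rest =>
    match PySem.List.pyGet? array i with
    | none => false
    | some cur_s =>
      match pvParse2 cur_s with
      | none => false
      | some current =>
        match PySem.List.pyGet? array (i - 1) with
        | none => false
        | some prev_s =>
          match pvParse2 prev_s with
          | none => false
          | some previous =>
            if current - previous ≠ expectedDiff then false
            else pvALoop array expectedDiff rest

def isSequentialArray (array : List String) : Bool :=
  let expectedDiff : Int := if array.length = 8 then 2 else 1
  pvALoop array expectedDiff (PySem.List.pyRange 1 (array.length : Int) 1)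

-- ===== PORT B =====
-- enumerate(array[1:], 1)
def pvEnum (k : Nat) : List String → List (Nat × String)
  | [] => []
  | s :: t => (k, s) :: pvEnum (k + 1) t

-- all(int(s[:2]) == start + k * diff for …): short-circuits at the first False;
-- 'false' in the 'none' arm marks inputs where the generator raises ValueError (outside Pre_)
def pvBAll (diff start : Int) : List (Nat × String) → Bool
  | [] => true
  | (k, s) :: rest =>
    match pvParse2 s with
    | none => false
    | some v => if v = start + (k : Int) * diff then pvBAll diff start rest else false

def isSequentialArray_alt (array : List String) : Bool :=
  if array.length < 2 then true
  else
    let diff : Int := if array.length = 8 then 2 else 1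
    match pvParse2 (array.headD "") with   -- int(array[0][:2]); none = ValueError (outside Pre_)
    | none => false
    | some start => pvBAll diff start (pvEnum 1 array.tail)

-- ===== PRECONDITION & SPEC =====
-- does this element's two-character prefix parse as an int?
def pvOk (array : List String) (j : Nat) : Bool := (pvParse2 (array.getD j "")).isSome

-- a non-sequential adjacent pair at index i whose prefix of elements all parses (A stops there)
def pvMismatchAt (array : List String) (i : Nat) : Bool :=
  decide (1 ≤ i) && (List.range (i + 1)).all (pvOk array) &&
    decide ((pvParse2 (array.getD i "")).getD 0 - (pvParse2 (array.getD (i - 1) "")).getD 0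
      ≠ (if array.length = 8 then 2 else 1))

-- Pre_ is exactly where Python A returns normally: lists shorter than 2 (the loop body never
-- runs), lists whose elements all parse, or lists with a reachable non-sequential pair (A
-- returns False before touching any unparseable element); everywhere else int() raises ValueError.
def Pre_isSequentialArray (array : List String) : Prop :=
  array.length < 2 ∨ (∀ s ∈ array, (pvParse2 s).isSome = true) ∨
    ((List.range array.length).any (pvMismatchAt array)) = true
instance (array : List String) : Decidable (Pre_isSequentialArray array) := by
  unfold Pre_isSequentialArray; infer_instance

def pvWitness_isSequentialArray : List String := ["01", "02", "03"]

def Spec_isSequentialArray (array : List String) (out : Bool) : Prop := out = isSequentialArray_alt array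
instance (array : List String) (out : Bool) : Decidable (Spec_isSequentialArray array out) := by unfold Spec_isSequentialArray; infer_instance

-- ===== CLAIM (what is proved, stated in full; the proofs are below) =====
def Claim_equal_isSequentialArray : Prop := ∀ (array : List String), Dom_isSequentialArray array → Pre_isSequentialArray array → Spec_isSequentialArray array (isSequentialArray array)

-- ===== LEMMAS AND PROOFS =====

-- proof-only reference: A's scan rewritten structurally over the remaining elements,
-- carrying the previous ELEMENT; 'false' marks the same raise points as pvALoop
def pvScan (d : Int) (prev : String) : List String → Bool
  | [] => true
  | s :: t =>
    match pvParse2 s, pvParse2 prev with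
    | some c, some p => if c - p ≠ d then false else pvScan d s t
    | _, _ => false

theorem pv_aloop_eq_scan (array : List String) (d : Int) :
    ∀ (k i : Nat), k = array.length - i → 1 ≤ i → i ≤ array.length →
      pvALoop array d (PySem.List.pyRange (i : Int) (array.length : Int) 1)
        = pvScan d (array.getD (i - 1) "") (array.drop i) := by
  intro k
  induction k with
  | zero =>
    intro i hk h1 h2
    have hi : i = array.length := by omega
    subst hi
    rw [PySem.List.pyRange_one_eq_nil (by omega)]
    simp [pvALoop, pvScan, List.drop_eq_nil_of_le]
  | succ k ih =>
    intro i hk h1 h2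
    have hi : i < array.length := by omega
    have hip : i - 1 < array.length := by omega
    rw [PySem.List.pyRange_one_cons (by exact_mod_cast hi)]
    have hget : PySem.List.pyGet? array (i : Int) = some array[i] := by
      simp [PySem.List.pyGet?_natCast, List.getElem?_eq_getElem hi]
    have hgetp : PySem.List.pyGet? array ((i : Int) - 1) = some array[i - 1] := by
      have : ((i : Int) - 1) = ((i - 1 : Nat) : Int) := by omega
      rw [this]
      simp [PySem.List.pyGet?_natCast, List.getElem?_eq_getElem hip]
    have hdrop : array.drop i = array[i] :: array.drop (i + 1) :=
      List.drop_eq_getElem_cons hi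
    have hgetd : array.getD (i - 1) "" = array[i - 1] := List.getD_eq_getElem _ _ hip
    simp only [pvALoop, hget, hgetp]
    rw [hdrop, hgetd]
    simp only [pvScan]
    cases hc : pvParse2 array[i] with
    | none => rfl
    | some c =>
      cases hp : pvParse2 array[i - 1] with
      | none => rfl
      | some p =>
        simp only
        by_cases hdiff : c - p ≠ d
        · simp [hdiff]
        · rw [not_not] at hdiff
          rw [if_neg (by omega)]
          have hrec := ih (i + 1) (by omega) (by omega) (by omega)
          have hcast : ((i : Int) + 1) = ((i + 1 : Nat) : Int) := by omega
          rw [hcast, hrec]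
          have : array.getD (i + 1 - 1) "" = array[i] := List.getD_eq_getElem _ _ hi
          rw [this, if_neg (by omega)]

theorem pv_ball_eq_scan (d start : Int) :
    ∀ (t : List String) (k : Nat) (prevS : String) (p : Int),
      pvParse2 prevS = some p → p = start + ((k : Int) - 1) * d → 1 ≤ k →
      pvBAll d start (pvEnum k t) = pvScan d prevS t := by
  intro t
  induction t with
  | nil => intro k prevS p _ _ _; rfl
  | cons s t ih =>
    intro k prevS p hprev hp hk
    simp only [pvEnum, pvBAll, pvScan, hprev]
    cases hs : pvParse2 s with
    | none => rfl
    | some c =>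
      simp only
      have hiff : (c = start + (k : Int) * d) ↔ ¬ (c - p ≠ d) := by
        constructor
        · intro h; rw [not_not]; rw [h, hp]; ring
        · rw [not_not]; intro h
          have : c = p + d := by omega
          rw [this, hp]; ring
      by_cases hc : c = start + (k : Int) * d
      · rw [if_pos hc, if_neg (hiff.mp hc)]
        exact ih (k + 1) s c hs (by push_cast; rw [hc]; ring) (by omega)
      · rw [if_neg hc]
        have : c - p ≠ d := by
          intro h; exact hc (hiff.mpr (by rw [not_not]; exact h))
        rw [if_pos this]

-- ===== VERDICT (by name: the statement is the Claim_ definition above) =====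
theorem isSequentialArray_spec : Claim_equal_isSequentialArray := by
  intro array _hdom _hpre
  unfold Spec_isSequentialArray isSequentialArray isSequentialArray_alt
  simp only
  set d : Int := if array.length = 8 then 2 else 1 with hd
  by_cases hshort : array.length < 2
  · rw [if_pos hshort]
    rw [PySem.List.pyRange_one_eq_nil (by exact_mod_cast by omega)]
    rfl
  · rw [if_neg hshort]
    have hlen : 1 ≤ array.length := by omega
    have hA := pv_aloop_eq_scan array d (array.length - 1) 1 (by omega) (by omega) hlen
    push_cast at hA
    rw [hA]
    cases harr : array with
    | nil => simp [harr] at hlen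
    | cons s t =>
      have hgd : (s :: t).getD 0 "" = s := rfl
      have hhd : (s :: t).headD "" = s := rfl
      rw [hgd, hhd]
      cases hps : pvParse2 s with
      | none =>
        -- array[0] does not parse and len ≥ 2: both scans hit the marker on the first pair
        cases t with
        | nil => simp [harr] at hshort
        | cons s1 t1 =>
          simp only [List.drop_one, List.tail_cons, pvScan, hps]
          cases pvParse2 s1 <;> rfl
      | some p =>
        rw [show (s :: t).drop 1 = t from rfl, show (s :: t).tail = t from rfl]
        exact (pv_ball_eq_scan d p t 1 s p hps (by push_cast; ring) le_rfl).symm
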